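-- pv_equiv track=rewrite | github.com/yabincui/topcoder | Trekking.py | findCamps
-- ===== SOURCE A (Python) =====
-- def findCamps(trail, plans):
-- 	n = len(trail)
-- 	result = -1
-- 	for plan in plans:
-- 		valid = True
-- 		campCount = 0
-- 		for i in range(n):
-- 			if trail[i] == '^' and plan[i] == 'C':
-- 				valid = False
-- 				break
-- 			if plan[i] == 'C':
-- 				campCount += 1
-- 		if valid:
-- 			if result == -1 or result > campCount:
-- 				result = campCount
-- 	return result
-- ===== SOURCE B (Python) =====
-- def findCamps(trail, plans):
--     # Column-wise sweep: one pass over trail positions updating all plans' (valid, count) states at once,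
--     # then a final pass picking the smallest count among plans still valid.
--     state = [(True, 0) for _ in plans]
--     for i in range(len(trail)):
--         peak = trail[i] == '^'
--         new_state = []
--         for (v, c), plan in zip(state, plans):
--             if v and plan[i] == 'C':
--                 if peak:
--                     v = False
--                 else:
--                     c += 1
--             new_state.append((v, c))
--         state = new_state
--     best = -1
--     for v, c in state:
--         if v and (best == -1 or c < best):
--             best = c
--     return best
-- ===== Notes on version B (the rewrite author's own statement) =====
-- stated objective: alternative
-- what changed: Transposes the traversal: instead of A's per-plan inner loop with early break and a running minimum, B sweeps trail positions once column-wise, updating a (valid, count) state for every plan simultaneously, then a final pass over the states picks the minimum.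
import Mathlib
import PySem

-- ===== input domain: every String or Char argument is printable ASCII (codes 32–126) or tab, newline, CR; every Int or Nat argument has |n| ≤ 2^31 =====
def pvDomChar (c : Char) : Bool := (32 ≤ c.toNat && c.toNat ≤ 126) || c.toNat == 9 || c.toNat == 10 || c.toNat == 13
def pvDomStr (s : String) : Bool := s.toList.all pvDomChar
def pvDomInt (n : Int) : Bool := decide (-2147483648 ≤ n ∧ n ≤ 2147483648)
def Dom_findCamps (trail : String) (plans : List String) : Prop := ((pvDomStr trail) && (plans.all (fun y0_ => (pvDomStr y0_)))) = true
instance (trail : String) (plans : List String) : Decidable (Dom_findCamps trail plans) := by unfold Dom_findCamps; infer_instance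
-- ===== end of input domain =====

-- B transposes the traversal: instead of A's per-plan loop with early break and a running
-- minimum, B sweeps the trail positions once, updating a (valid, count) state for every plan
-- simultaneously, then a final pass over the states picks the minimum (objective: alternative).

-- ===== PORT A =====
-- inner 'for i in range(n)' loop of A: returns (valid, campCount); none = IndexError (plan too short)
def findCampsLoop (t p : List Char) (n i cnt : Nat) : Option (Bool × Nat) :=
  if _h : i < n then
    match PySem.List.pyGet? t (i : Int), PySem.List.pyGet? p (i : Int) with
    | some tc, some pc =>
      if tc = '^' ∧ pc = 'C' then some (false, cnt)
      else findCampsLoop t p n (i + 1) (if pc = 'C' then cnt + 1 else cnt)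
    | _, _ => none
  else some (true, cnt)
  termination_by n - i

-- body of A's outer 'for plan in plans' loop
def stepA (t : List Char) (result : Int) (plan : String) : Int :=
  match findCampsLoop t plan.toList t.length 0 0 with
  | none => result        -- Python raises IndexError here; these inputs are excluded by Pre_
  | some (valid, campCount) =>
    if valid then
      if result = -1 ∨ result > (campCount : Int) then (campCount : Int) else result
    else result

def findCamps (trail : String) (plans : List String) : Int :=
  plans.foldl (stepA trail.toList) (-1)

-- ===== PORT B =====
-- 'if v and plan[i] == "C": if peak: v = False else: c += 1' for one plan's (v, c) state
-- (out-of-range plan[i] reads as 'not C'; Pre_ guarantees a still-valid plan is never short)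
def colUpd (peak : Bool) (i : Nat) (st : Bool × Int) (p : List Char) : Bool × Int :=
  if st.1 && (PySem.List.pyGet? p (i : Int) == some 'C') then
    if peak then (false, st.2) else (st.1, st.2 + 1)
  else st

-- one column i: 'peak = trail[i] == "^"' then the inner 'for … in zip(state, plans)' loop
def bCol (t : List Char) (ps : List (List Char)) (st : List (Bool × Int)) (i : Nat) : List (Bool × Int) :=
  let peak := PySem.List.pyGet? t (i : Int) == some '^'
  (st.zip ps).map (fun sp => colUpd peak i sp.1 sp.2)

-- final pass: 'if v and (best == -1 or c < best): best = c'
def bestStep (best : Int) (vc : Bool × Int) : Int :=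
  if vc.1 && (best == -1 || vc.2 < best) then vc.2 else best

def findCamps_alt (trail : String) (plans : List String) : Int :=
  let t := trail.toList
  let ps := plans.map String.toList
  let st0 : List (Bool × Int) := ps.map (fun _ => (true, 0))
  let stN := (List.range t.length).foldl (bCol t ps) st0
  stN.foldl bestStep (-1)

-- ===== PRECONDITION & SPEC =====
-- Pre_ excludes exactly the inputs where A raises IndexError: a plan shorter than the trail
-- whose prefix contains no '^'/'C' conflict (the inner loop then reads past the plan's end).
def Pre_findCamps (trail : String) (plans : List String) : Prop :=
  ∀ plan ∈ plans, plan.toList.length < trail.toList.length →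
    ∃ i < plan.toList.length, trail.toList[i]? = some '^' ∧ plan.toList[i]? = some 'C'
instance (trail : String) (plans : List String) : Decidable (Pre_findCamps trail plans) := by
  unfold Pre_findCamps; infer_instance

def pvWitness_findCamps : String × List String := ("^._", ["..C", "C.."])

def Spec_findCamps (trail : String) (plans : List String) (out : Int) : Prop := out = findCamps_alt trail plans
instance (trail : String) (plans : List String) (out : Int) : Decidable (Spec_findCamps trail plans out) := by unfold Spec_findCamps; infer_instance

-- ===== CLAIM (what is proved, stated in full; the proofs are below) =====
def Claim_equal_findCamps : Prop := ∀ (trail : String) (plans : List String), Dom_findCamps trail plans → Pre_findCamps trail plans → Spec_findCamps trail plans (findCamps trail plans)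

-- ===== LEMMAS AND PROOFS =====

-- the per-plan precondition, on the list side
def prePlan (t p : List Char) : Prop :=
  p.length < t.length → ∃ i < p.length, t[i]? = some '^' ∧ p[i]? = some 'C'

-- running-minimum step of A (what stepA does on a valid plan)
def mstep (r c : Int) : Int := if r = -1 ∨ r > c then c else r

-- validity of a plan (no '^'/'C' conflict in the overlap) and its camp count
def planValid (t p : List Char) : Bool :=
  (t.zip p).all (fun tc => !(tc.1 == '^' && tc.2 == 'C'))
def planCamps (t : List Char) (plan : String) : Int :=
  ((plan.toList.take t.length).count 'C' : Int)

-- B's per-plan state after processing columns ks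
def perPlan (t p : List Char) (ks : List Nat) : Bool × Int :=
  ks.foldl (fun st (i : Nat) => colUpd (PySem.List.pyGet? t (i : Int) == some '^') i st p) (true, 0)

-- ---- A-side characterisation ----

-- the loop on a conflict-free, long-enough plan counts the 'C's among p[i:n]
lemma loop_valid (t p : List Char) (n : Nat) (hn : n = t.length) (hp : n ≤ p.length)
    (hok : ∀ j, j < n → ¬(t[j]? = some '^' ∧ p[j]? = some 'C')) :
    ∀ k i cnt, n - i = k →
      findCampsLoop t p n i cnt = some (true, cnt + ((p.take n).drop i).count 'C') := by
  intro k
  induction k with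
  | zero =>
    intro i cnt hk
    have hge : n ≤ i := by omega
    rw [findCampsLoop]
    rw [dif_neg (by omega)]
    rw [List.drop_eq_nil_of_le (by simp [List.length_take]; omega)]
    simp
  | succ k ih =>
    intro i cnt hk
    have hi : i < n := by omega
    have hit : i < t.length := by omega
    have hip : i < p.length := by omega
    rw [findCampsLoop, dif_pos hi]
    simp only [PySem.List.pyGet?_natCast]
    rw [List.getElem?_eq_getElem hit, List.getElem?_eq_getElem hip]
    have hnc : ¬(t[i] = '^' ∧ p[i] = 'C') := by
      intro hc
      exact hok i hi ⟨by rw [List.getElem?_eq_getElem hit, hc.1],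
                      by rw [List.getElem?_eq_getElem hip, hc.2]⟩
    simp only [if_neg hnc]
    rw [ih (i + 1) (if p[i] = 'C' then cnt + 1 else cnt) (by omega)]
    have hlt : i < (p.take n).length := by simp [List.length_take]; omega
    have hdrop : (p.take n).drop i = (p.take n)[i] :: (p.take n).drop (i + 1) :=
      (List.getElem_cons_drop (as := p.take n) (i := i) hlt).symm
    have hti : (p.take n)[i]'hlt = p[i] := by simp [List.getElem_take]
    rw [hdrop, hti, List.count_cons]
    by_cases hC : p[i] = 'C' <;> simp [hC] <;> omega

-- the loop on a plan with a conflict at a readable index returns (false, _)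
lemma loop_invalid (t p : List Char) (n : Nat) (hn : n = t.length) :
    ∀ k i cnt, n - i = k →
      (∃ j, i ≤ j ∧ j < n ∧ j < p.length ∧ t[j]? = some '^' ∧ p[j]? = some 'C') →
      ∃ c, findCampsLoop t p n i cnt = some (false, c) := by
  intro k
  induction k with
  | zero =>
    intro i cnt hk ⟨j, hij, hjn, _, _, _⟩
    omega
  | succ k ih =>
    intro i cnt hk ⟨j, hij, hjn, hjp, ht, hpc⟩
    have hi : i < n := by omega
    have hit : i < t.length := by omega
    have hip : i < p.length := by omega
    rw [findCampsLoop, dif_pos hi]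
    simp only [PySem.List.pyGet?_natCast]
    rw [List.getElem?_eq_getElem hit, List.getElem?_eq_getElem hip]
    by_cases hc : t[i] = '^' ∧ p[i] = 'C'
    · exact ⟨cnt, by simp [hc]⟩
    · simp only [if_neg hc]
      have hne : i ≠ j := by
        intro h; subst h
        exact hc ⟨by rw [List.getElem?_eq_getElem hit] at ht; exact Option.some.inj ht,
                  by rw [List.getElem?_eq_getElem hip] at hpc; exact Option.some.inj hpc⟩
      exact ih (i + 1) (if p[i] = 'C' then cnt + 1 else cnt) (by omega)
        ⟨j, by omega, hjn, hjp, ht, hpc⟩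

-- a plan passing the zip validity test and the per-plan precondition is long enough and conflict-free
lemma valid_long_ok (t p : List Char) (hpre : prePlan t p)
    (hv : planValid t p = true) :
    t.length ≤ p.length ∧ ∀ j, j < t.length → ¬(t[j]? = some '^' ∧ p[j]? = some 'C') := by
  have hok : ∀ j, j < min t.length p.length →
      ¬(t[j]? = some '^' ∧ p[j]? = some 'C') := by
    intro j hj ⟨h1, h2⟩
    have hjt : j < t.length := lt_of_lt_of_le hj (min_le_left _ _)
    have hjp : j < p.length := lt_of_lt_of_le hj (min_le_right _ _)
    have hjz : j < (t.zip p).length := by rw [List.length_zip]; omega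
    have hmem : (t[j], p[j]) ∈ t.zip p := by
      have hg : (t.zip p)[j]'hjz = (t[j], p[j]) := List.getElem_zip ..
      exact hg ▸ List.getElem_mem hjz
    have := List.all_eq_true.mp hv _ hmem
    rw [List.getElem?_eq_getElem hjt] at h1
    rw [List.getElem?_eq_getElem hjp] at h2
    simp [Option.some.inj h1, Option.some.inj h2] at this
  have hlong : t.length ≤ p.length := by
    by_contra hshort
    obtain ⟨i, hi, hconf⟩ := hpre (by omega)
    exact hok i (by omega) hconf
  exact ⟨hlong, fun j hj => hok j (by omega)⟩

-- a plan failing the zip validity test has a conflict at a readable index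
lemma invalid_conflict (t p : List Char) (hv : ¬ planValid t p = true) :
    ∃ j, j < t.length ∧ j < p.length ∧ t[j]? = some '^' ∧ p[j]? = some 'C' := by
  have : ∃ x ∈ t.zip p, ¬(!(x.1 == '^' && x.2 == 'C')) = true := by
    by_contra h
    simp only [not_exists, not_and, not_not] at h
    exact hv (List.all_eq_true.mpr (fun x hx => h x hx))
  obtain ⟨x, hx, hxc⟩ := this
  obtain ⟨j, hjl, hjx⟩ := List.mem_iff_getElem.mp hx
  have hjl' : j < min t.length p.length := by simpa [List.length_zip] using hjl
  have hzj : (t.zip p)[j] = (t[j], p[j]) := List.getElem_zip ..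
  have hjt : j < t.length := lt_of_lt_of_le hjl' (min_le_left _ _)
  have hjp : j < p.length := lt_of_lt_of_le hjl' (min_le_right _ _)
  rw [hzj] at hjx
  have hconf : t[j] = '^' ∧ p[j] = 'C' := by subst hjx; simpa using hxc
  exact ⟨j, hjt, hjp,
    by rw [List.getElem?_eq_getElem hjt, hconf.1],
    by rw [List.getElem?_eq_getElem hjp, hconf.2]⟩

-- on a plan satisfying the per-plan precondition, stepA is exactly the filtered running minimum
lemma stepA_eq (t : List Char) (plan : String) (hpre : prePlan t plan.toList) (r : Int) :
    stepA t r plan =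
      if planValid t plan.toList then mstep r (planCamps t plan) else r := by
  unfold stepA planCamps
  by_cases hv : planValid t plan.toList
  · obtain ⟨hlong, hok⟩ := valid_long_ok t plan.toList hpre hv
    rw [loop_valid t plan.toList t.length rfl hlong hok (t.length - 0) 0 0 rfl]
    rw [if_pos hv]
    unfold mstep
    norm_num
  · obtain ⟨j, hjt, hjp, h1, h2⟩ := invalid_conflict t plan.toList hv
    obtain ⟨c, hc⟩ := loop_invalid t plan.toList t.length rfl (t.length - 0) 0 0 rfl
      ⟨j, Nat.zero_le _, hjt, hjp, h1, h2⟩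
    rw [hc, if_neg hv]
    rfl

-- A's fold over plans equals the mstep-fold over the filtered candidate counts
lemma fold_eq (t : List Char) :
    ∀ (L : List String) (r : Int), (∀ plan ∈ L, prePlan t plan.toList) →
      L.foldl (stepA t) r =
        ((L.filter (fun plan => planValid t plan.toList)).map (planCamps t)).foldl mstep r := by
  intro L
  induction L with
  | nil => intro r _; rfl
  | cons plan L ih =>
    intro r hpre
    simp only [List.foldl_cons]
    rw [stepA_eq t plan (hpre plan (by simp))]
    by_cases hv : planValid t plan.toList
    · have hfc : List.filter (fun plan => planValid t plan.toList) (plan :: L)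
          = plan :: List.filter (fun plan => planValid t plan.toList) L := by
        simp [hv]
      rw [if_pos hv, hfc, List.map_cons, List.foldl_cons]
      exact ih _ (fun p hp => hpre p (by simp [hp]))
    · have hfc : List.filter (fun plan => planValid t plan.toList) (plan :: L)
          = List.filter (fun plan => planValid t plan.toList) L := by
        simp [hv]
      rw [if_neg hv, hfc]
      exact ih _ (fun p hp => hpre p (by simp [hp]))

-- ---- B-side characterisation ----

-- zipping a mapped copy of a list with the list itself
lemma zip_map_self {α β : Type} (f : α → β) :
    ∀ (l : List α), (l.map f).zip l = l.map (fun x => (f x, x)) := by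
  intro l
  induction l with
  | nil => rfl
  | cons x l ih => simp [ih]

-- loop interchange: the column-wise fold is pointwise the per-plan fold
lemma exchange (t : List Char) (ps : List (List Char)) :
    ∀ (ks : List Nat) (f : List Char → Bool × Int),
      ks.foldl (bCol t ps) (ps.map f) =
        ps.map (fun p => ks.foldl
          (fun st (i : Nat) => colUpd (PySem.List.pyGet? t (i : Int) == some '^') i st p) (f p)) := by
  intro ks
  induction ks with
  | nil => intro f; rfl
  | cons i ks ih =>
    intro f
    simp only [List.foldl_cons]
    have hcol : bCol t ps (ps.map f) i
        = ps.map (fun p => colUpd (PySem.List.pyGet? t (i : Int) == some '^') i (f p) p) := by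
      unfold bCol
      rw [zip_map_self, List.map_map]
      rfl
    rw [hcol, ih]

-- once a plan's state is invalid it stays invalid with the same count
lemma perPlan_stays_false (t p : List Char) :
    ∀ (ks : List Nat) (c : Int),
      ks.foldl (fun st (i : Nat) => colUpd (PySem.List.pyGet? t (i : Int) == some '^') i st p)
        (false, c) = (false, c) := by
  intro ks
  induction ks with
  | nil => intro c; rfl
  | cons i ks ih =>
    intro c
    have hstep : colUpd (PySem.List.pyGet? t (i : Int) == some '^') i (false, c) p = (false, c) := by
      simp [colUpd]
    simp only [List.foldl_cons, hstep]
    exact ih c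

-- a conflict-free, long-enough plan ends valid with the full camp count
lemma perPlan_valid_aux (t p : List Char) (n : Nat) (hn : n = t.length) (hp : n ≤ p.length)
    (hok : ∀ j, j < n → ¬(t[j]? = some '^' ∧ p[j]? = some 'C')) :
    ∀ k i cnt, i + k = n →
      (List.range' i k).foldl
        (fun st (j : Nat) => colUpd (PySem.List.pyGet? t (j : Int) == some '^') j st p) (true, cnt)
        = (true, cnt + (((p.take n).drop i).count 'C' : Int)) := by
  intro k
  induction k with
  | zero =>
    intro i cnt hk
    rw [List.drop_eq_nil_of_le (by simp [List.length_take]; omega)]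
    simp [List.range']
  | succ k ih =>
    intro i cnt hk
    have hi : i < n := by omega
    have hit : i < t.length := by omega
    have hip : i < p.length := by omega
    rw [List.range'_succ, List.foldl_cons]
    have hget_p : PySem.List.pyGet? p (i : Int) = some p[i] := by
      simp [PySem.List.pyGet?_natCast, List.getElem?_eq_getElem hip]
    have hget_t : PySem.List.pyGet? t (i : Int) = some t[i] := by
      simp [PySem.List.pyGet?_natCast, List.getElem?_eq_getElem hit]
    have hnc : ¬(t[i] = '^' ∧ p[i] = 'C') := by
      intro hc
      exact hok i hi ⟨by rw [List.getElem?_eq_getElem hit, hc.1],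
                      by rw [List.getElem?_eq_getElem hip, hc.2]⟩
    have hlt : i < (p.take n).length := by simp [List.length_take]; omega
    have hdrop : (p.take n).drop i = (p.take n)[i] :: (p.take n).drop (i + 1) :=
      (List.getElem_cons_drop (as := p.take n) (i := i) hlt).symm
    have hti : (p.take n)[i]'hlt = p[i] := by simp [List.getElem_take]
    by_cases hC : p[i] = 'C'
    · have hpk : ¬ t[i] = '^' := fun h => hnc ⟨h, hC⟩
      have hstep : colUpd (PySem.List.pyGet? t (i : Int) == some '^') i (true, cnt) p
          = (true, cnt + 1) := by
        simp [colUpd, hget_p, hget_t, hC, hpk]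
      rw [hstep, ih (i + 1) (cnt + 1) (by omega), hdrop, hti, List.count_cons]
      simp [hC]
      ring_nf
    · have hstep : colUpd (PySem.List.pyGet? t (i : Int) == some '^') i (true, cnt) p
          = (true, cnt) := by
        simp [colUpd, hget_p, hC]
      rw [hstep, ih (i + 1) cnt (by omega), hdrop, hti, List.count_cons]
      simp [hC]
  -- counts the same 'C's as A's loop

-- a plan with a conflict at a readable index ends invalid
lemma perPlan_invalid_aux (t p : List Char) (n : Nat) (hn : n = t.length) :
    ∀ k i cnt, i + k = n →
      (∃ j, i ≤ j ∧ j < n ∧ j < p.length ∧ t[j]? = some '^' ∧ p[j]? = some 'C') →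
      ((List.range' i k).foldl
        (fun st (j : Nat) => colUpd (PySem.List.pyGet? t (j : Int) == some '^') j st p)
        (true, cnt)).1 = false := by
  intro k
  induction k with
  | zero =>
    intro i cnt hk ⟨j, hij, hjn, _, _, _⟩
    omega
  | succ k ih =>
    intro i cnt hk ⟨j, hij, hjn, hjp, ht, hpc⟩
    have hi : i < n := by omega
    have hit : i < t.length := by omega
    have hip : i < p.length := by omega
    rw [List.range'_succ, List.foldl_cons]
    have hget_p : PySem.List.pyGet? p (i : Int) = some p[i] := by
      simp [PySem.List.pyGet?_natCast, List.getElem?_eq_getElem hip]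
    have hget_t : PySem.List.pyGet? t (i : Int) = some t[i] := by
      simp [PySem.List.pyGet?_natCast, List.getElem?_eq_getElem hit]
    by_cases hc : t[i] = '^' ∧ p[i] = 'C'
    · have hstep : colUpd (PySem.List.pyGet? t (i : Int) == some '^') i (true, cnt) p
          = (false, cnt) := by
        simp [colUpd, hget_p, hget_t, hc.1, hc.2]
      rw [hstep, perPlan_stays_false]
    · have hne : i ≠ j := by
        intro h; subst h
        exact hc ⟨by rw [List.getElem?_eq_getElem hit] at ht; exact Option.some.inj ht,
                  by rw [List.getElem?_eq_getElem hip] at hpc; exact Option.some.inj hpc⟩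
      have hwit : ∃ j', i + 1 ≤ j' ∧ j' < n ∧ j' < p.length ∧
          t[j']? = some '^' ∧ p[j']? = some 'C' := ⟨j, by omega, hjn, hjp, ht, hpc⟩
      by_cases hC : p[i] = 'C'
      · have hpk : ¬ t[i] = '^' := fun h => hc ⟨h, hC⟩
        have hstep : colUpd (PySem.List.pyGet? t (i : Int) == some '^') i (true, cnt) p
            = (true, cnt + 1) := by
          simp [colUpd, hget_p, hget_t, hC, hpk]
        rw [hstep]
        exact ih (i + 1) (cnt + 1) (by omega) hwit
      · have hstep : colUpd (PySem.List.pyGet? t (i : Int) == some '^') i (true, cnt) p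
            = (true, cnt) := by
          simp [colUpd, hget_p, hC]
        rw [hstep]
        exact ih (i + 1) cnt (by omega) hwit

-- per-plan summary on a valid plan
lemma perPlan_valid (t : List Char) (plan : String) (hpre : prePlan t plan.toList)
    (hv : planValid t plan.toList = true) :
    perPlan t plan.toList (List.range t.length) = (true, planCamps t plan) := by
  obtain ⟨hlong, hok⟩ := valid_long_ok t plan.toList hpre hv
  unfold perPlan planCamps
  rw [List.range_eq_range']
  simpa using perPlan_valid_aux t plan.toList t.length rfl hlong hok t.length 0 0 (by omega)

-- per-plan summary on an invalid plan
lemma perPlan_invalid (t : List Char) (plan : String)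
    (hv : ¬ planValid t plan.toList = true) :
    (perPlan t plan.toList (List.range t.length)).1 = false := by
  obtain ⟨j, hjt, hjp, h1, h2⟩ := invalid_conflict t plan.toList hv
  unfold perPlan
  rw [List.range_eq_range']
  exact perPlan_invalid_aux t plan.toList t.length rfl t.length 0 0 (by omega)
    ⟨j, Nat.zero_le _, hjt, hjp, h1, h2⟩

-- bestStep on a valid state is A's running-minimum step
lemma bestStep_true (r c : Int) : bestStep r (true, c) = mstep r c := by
  unfold bestStep mstep
  by_cases h : r = -1 ∨ r > c
  · rw [if_pos h]
    have hb : ((true && (r == -1 || decide (c < r))) = true) := by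
      rcases h with h | h
      · simp [h]
      · simp; omega
    rw [if_pos hb]
  · rw [if_neg h]
    push_neg at h
    have hb : ¬ ((true && (r == -1 || decide (c < r))) = true) := by
      simp only [Bool.true_and, Bool.or_eq_true, beq_iff_eq, decide_eq_true_eq]
      push_neg
      exact ⟨h.1, by omega⟩
    rw [if_neg hb]

-- bestStep ignores an invalid state
lemma bestStep_false (r : Int) (c : Int) : bestStep r (false, c) = r := by
  simp [bestStep]

-- B's final pass over the per-plan states equals the mstep-fold over the filtered counts
lemma bFold_eq (t : List Char) :
    ∀ (L : List String) (r : Int), (∀ plan ∈ L, prePlan t plan.toList) →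
      (L.map (fun plan => perPlan t plan.toList (List.range t.length))).foldl bestStep r =
        ((L.filter (fun plan => planValid t plan.toList)).map (planCamps t)).foldl mstep r := by
  intro L
  induction L with
  | nil => intro r _; rfl
  | cons plan L ih =>
    intro r hpre
    simp only [List.map_cons, List.foldl_cons]
    by_cases hv : planValid t plan.toList
    · rw [perPlan_valid t plan (hpre plan (by simp)) hv, bestStep_true]
      have hfc : List.filter (fun plan => planValid t plan.toList) (plan :: L)
          = plan :: List.filter (fun plan => planValid t plan.toList) L := by simp [hv]
      rw [hfc, List.map_cons, List.foldl_cons]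
      exact ih _ (fun p hp => hpre p (by simp [hp]))
    · have hst : perPlan t plan.toList (List.range t.length)
          = (false, (perPlan t plan.toList (List.range t.length)).2) := by
        have := perPlan_invalid t plan hv
        exact Prod.ext this rfl
      rw [hst, bestStep_false]
      have hfc : List.filter (fun plan => planValid t plan.toList) (plan :: L)
          = List.filter (fun plan => planValid t plan.toList) L := by simp [hv]
      rw [hfc]
      exact ih _ (fun p hp => hpre p (by simp [hp]))

-- ===== VERDICT (by name: the statement is the Claim_ definition above) =====
theorem findCamps_spec : Claim_equal_findCamps := by
  intro trail plans _ hpre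
  unfold Spec_findCamps findCamps findCamps_alt
  rw [fold_eq trail.toList plans (-1) (fun plan hp => hpre plan hp)]
  show _ = List.foldl bestStep (-1)
      (List.foldl (bCol trail.toList (plans.map String.toList))
        ((plans.map String.toList).map (fun _ => ((true : Bool), (0 : Int))))
        (List.range trail.toList.length))
  rw [exchange, List.map_map]
  exact (bFold_eq trail.toList plans (-1) (fun plan hp => hpre plan hp)).symm
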